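-- pv_equiv track=rewrite | github.com/davidmcq137/JetiLuaDFM | GlassBuild/ALookCom/utils.py | listToStr
-- ===== SOURCE A (Python) =====
-- def listToStr(lst, len = -1):
--     str = ""
--
--     for char in lst:
--         if char != 0:
--             str += chr(char)
--         else:
--             break
--
--         if len != -1:
--             len -= 1
--             if len == 0:
--                 break
--     return str
-- ===== SOURCE B (Python) =====
-- def listToStr(lst, len = -1):
--     cut = next((i for i, c in enumerate(lst) if c == 0), None)
--     prefix = lst if cut is None else lst[:cut]
--     if len > 0:
--         prefix = prefix[:len]
--     return ''.join(chr(c) for c in prefix)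
-- ===== Notes on version B (the rewrite author's own statement) =====
-- stated objective: simpler
-- what changed: Replaces the incremental scan-with-mutable-counter (append, decrement len, break on 0) by locate-the-first-zero, slice the prefix (capped at len only when len > 0), and one join; Pre_ excludes inputs where chr raises (negative or > 0x10FFFF codes in the emitted prefix) and surrogate code points, which Lean's Char/String cannot represent.
import Mathlib
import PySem

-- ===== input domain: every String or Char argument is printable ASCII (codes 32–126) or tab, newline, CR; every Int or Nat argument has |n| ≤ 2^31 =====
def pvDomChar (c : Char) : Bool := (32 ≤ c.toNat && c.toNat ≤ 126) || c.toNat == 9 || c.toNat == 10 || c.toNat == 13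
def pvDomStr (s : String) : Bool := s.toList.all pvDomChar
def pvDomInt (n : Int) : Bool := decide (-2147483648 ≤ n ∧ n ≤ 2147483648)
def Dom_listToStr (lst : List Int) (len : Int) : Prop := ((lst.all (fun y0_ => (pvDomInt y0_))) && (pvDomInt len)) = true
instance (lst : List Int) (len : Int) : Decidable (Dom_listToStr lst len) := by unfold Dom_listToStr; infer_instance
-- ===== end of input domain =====

-- B replaces A's incremental scan with a mutable countdown by: locate the first zero,
-- slice the prefix (capped at len only when len > 0), and join the characters (objective: simpler).

-- ===== PORT A =====
-- chr(char) is ported as Char.ofNat char.toNat, exact on Pre_ (emitted codes are valid,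
-- non-surrogate code points there); the growing Python string is carried as its List Char.
def listToStrGoA : List Int → List Char → Int → List Char
  | [], acc, _ => acc
  | ch :: rest, acc, len =>
    if ch ≠ 0 then
      let acc' := acc ++ [Char.ofNat ch.toNat]
      if len ≠ -1 then
        if len - 1 = 0 then acc' else listToStrGoA rest acc' (len - 1)
      else listToStrGoA rest acc' len
    else acc

def listToStr (lst : List Int) (len : Int) : String :=
  String.mk (listToStrGoA lst [] len)

-- ===== PORT B =====
def listToStr_alt (lst : List Int) (len : Int) : String :=
  let cut := PySem.List.index? lst 0          -- next((i for i, c in enumerate(lst) if c == 0), None)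
  let prefix1 := match cut with
    | none => lst
    | some i => lst.take i                    -- lst[:cut], cut a non-negative in-range index
  let prefix2 := if len > 0 then prefix1.take len.toNat else prefix1   -- prefix[:len] with len > 0
  String.mk (prefix2.map (fun c => Char.ofNat c.toNat))                -- ''.join(chr(c) for c in prefix)

-- ===== PRECONDITION & SPEC =====
-- the character codes both programs actually pass to chr: the prefix before the first zero,
-- capped at len when len > 0
def pvTake0 : List Int → List Int
  | [] => []
  | c :: rest => if c = 0 then [] else c :: pvTake0 rest

def pvEmitted_listToStr (lst : List Int) (len : Int) : List Int :=
  if len > 0 then (pvTake0 lst).take len.toNat else pvTake0 lst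

-- Pre_ excludes exactly the inputs where chr raises ValueError (an emitted code < 0 or
-- > 0x10FFFF), plus emitted surrogate code points (0xD800–0xDFFF), on which Python A returns
-- a lone-surrogate str that Lean's Char/String cannot represent.
def Pre_listToStr (lst : List Int) (len : Int) : Prop :=
  ∀ c ∈ pvEmitted_listToStr lst len, 0 ≤ c ∧ c ≤ 1114111 ∧ ¬ (55296 ≤ c ∧ c ≤ 57343)
instance (lst : List Int) (len : Int) : Decidable (Pre_listToStr lst len) := by
  unfold Pre_listToStr; infer_instance

def pvWitness_listToStr : List Int × Int := ([72, 105, 0, 2000000], -1)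

def Spec_listToStr (lst : List Int) (len : Int) (out : String) : Prop := out = listToStr_alt lst len
instance (lst : List Int) (len : Int) (out : String) : Decidable (Spec_listToStr lst len out) := by unfold Spec_listToStr; infer_instance

-- ===== CLAIM (what is proved, stated in full; the proofs are below) =====
def Claim_equal_listToStr : Prop := ∀ (lst : List Int) (len : Int), Dom_listToStr lst len → Pre_listToStr lst len → Spec_listToStr lst len (listToStr lst len)

-- ===== LEMMAS AND PROOFS =====

-- A's loop emits exactly the characters of pvEmitted_listToStr, appended to the accumulator.
theorem listToStrGoA_eq (lst : List Int) :
    ∀ (len : Int) (acc : List Char),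
      listToStrGoA lst acc len
        = acc ++ (pvEmitted_listToStr lst len).map (fun c => Char.ofNat c.toNat) := by
  induction lst with
  | nil => intro len acc; simp [listToStrGoA, pvEmitted_listToStr, pvTake0]
  | cons ch rest ih =>
    intro len acc
    by_cases h0 : ch = 0
    · subst h0
      simp [listToStrGoA, pvEmitted_listToStr, pvTake0]
    · have htw : pvTake0 (ch :: rest) = ch :: pvTake0 rest := by simp [pvTake0, h0]
      by_cases hm1 : len = -1
      · subst hm1
        have hstep : listToStrGoA (ch :: rest) acc (-1)
            = listToStrGoA rest (acc ++ [Char.ofNat ch.toNat]) (-1) := by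
          simp [listToStrGoA, h0]
        have hemit : pvEmitted_listToStr (ch :: rest) (-1)
            = ch :: pvEmitted_listToStr rest (-1) := by
          simp [pvEmitted_listToStr, htw]
        rw [hstep, ih, hemit]; simp
      · by_cases h1 : len = 1
        · subst h1
          have hstep : listToStrGoA (ch :: rest) acc 1 = acc ++ [Char.ofNat ch.toNat] := by
            simp [listToStrGoA, h0]
          have hemit : pvEmitted_listToStr (ch :: rest) 1 = [ch] := by
            simp [pvEmitted_listToStr, htw]
          rw [hstep, hemit]; simp
        · have hne : ¬ (len - 1 = 0) := by omega
          have hstep : listToStrGoA (ch :: rest) acc len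
              = listToStrGoA rest (acc ++ [Char.ofNat ch.toNat]) (len - 1) := by
            simp [listToStrGoA, h0, hm1, hne]
          have hemit : pvEmitted_listToStr (ch :: rest) len
              = ch :: pvEmitted_listToStr rest (len - 1) := by
            by_cases hpos : 0 < len
            · have htn : len.toNat = (len - 1).toNat + 1 := by omega
              simp only [pvEmitted_listToStr]
              rw [if_pos hpos, if_pos (show (0:Int) < len - 1 by omega), htw, htn,
                List.take_succ_cons]
            · simp only [pvEmitted_listToStr]
              rw [if_neg hpos, if_neg (show ¬ ((0:Int) < len - 1) by omega), htw]
          rw [hstep, ih, hemit]; simp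

theorem pvTake0_of_not_mem (l : List Int) (h : (0:Int) ∉ l) : pvTake0 l = l := by
  induction l with
  | nil => rfl
  | cons x xs ih =>
    simp only [List.mem_cons, not_or] at h
    simp [pvTake0, Ne.symm h.1, ih h.2]

theorem pvTake0_split (pre suf : List Int) (h : (0:Int) ∉ pre) :
    pvTake0 (pre ++ 0 :: suf) = pre := by
  induction pre with
  | nil => simp [pvTake0]
  | cons x xs ih =>
    simp only [List.mem_cons, not_or] at h
    simp [pvTake0, Ne.symm h.1, ih h.2]

-- B computes the same prefix: its slice at the first zero equals pvTake0.
theorem listToStr_alt_eq (lst : List Int) (len : Int) :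
    listToStr_alt lst len
      = String.mk ((pvEmitted_listToStr lst len).map (fun c => Char.ofNat c.toNat)) := by
  unfold listToStr_alt pvEmitted_listToStr
  rcases hcut : PySem.List.index? lst 0 with _ | i
  · have h0 : (0:Int) ∉ lst := by
      rw [PySem.List.index?_eq_none_iff] at hcut; exact hcut
    rw [pvTake0_of_not_mem lst h0]
  · rw [PySem.List.index?_eq_some_iff] at hcut
    obtain ⟨pre, suf, hl, hlen, hnm⟩ := hcut
    subst hl
    rw [pvTake0_split pre suf hnm]
    dsimp only
    rw [← hlen, List.take_left]

-- ===== VERDICT (by name: the statement is the Claim_ definition above) =====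
theorem listToStr_spec : Claim_equal_listToStr := by
  intro lst len _ _
  unfold Spec_listToStr listToStr
  rw [listToStrGoA_eq lst len [], listToStr_alt_eq]
  simp
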